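-- pv_equiv track=rewrite | github.com/kevinji/project-euler | problem_35.py | get_digit_rotations
-- ===== SOURCE A (Python) =====
-- import collections
--
-- def get_digit_rotations(digits):
--     rotations = []
--     digits_deque = collections.deque(digits)
--     length = len(digits)
--
--     # Rotate through all the digits
--     for _ in range(length):
--         rotations.append(get_number_from_digits(digits_deque))
--         digits_deque.rotate(1)
--
--     # Remove duplicates
--     return set(rotations)
--
-- def get_number_from_digits(digits_deque):
--     number = 0
--     length = len(digits_deque)
--
--     for digit_num in range(length):
--         number *= 10
--         number += digits_deque[digit_num]
--
--     return number
-- ===== SOURCE B (Python) =====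
-- def get_digit_rotations(digits):
--     n = len(digits)
--     if n == 0:
--         return set()
--     num = 0
--     for d in digits:
--         num = num * 10 + d
--     p = 10 ** (n - 1)
--     result = {num}
--     for k in range(n - 1):
--         last = digits[n - 1 - k]
--         num = last * p + (num - last) // 10
--         result.add(num)
--     return result
-- ===== Notes on version B (the rewrite author's own statement) =====
-- stated objective: faster
-- what changed: B computes the first rotation's value once and derives each subsequent rotation value in O(1) arithmetic (move the last digit to the top place: last*10^(n-1) + (num-last)//10) instead of A's recomputing every rotation digit by digit with a deque.
import Mathlib
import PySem

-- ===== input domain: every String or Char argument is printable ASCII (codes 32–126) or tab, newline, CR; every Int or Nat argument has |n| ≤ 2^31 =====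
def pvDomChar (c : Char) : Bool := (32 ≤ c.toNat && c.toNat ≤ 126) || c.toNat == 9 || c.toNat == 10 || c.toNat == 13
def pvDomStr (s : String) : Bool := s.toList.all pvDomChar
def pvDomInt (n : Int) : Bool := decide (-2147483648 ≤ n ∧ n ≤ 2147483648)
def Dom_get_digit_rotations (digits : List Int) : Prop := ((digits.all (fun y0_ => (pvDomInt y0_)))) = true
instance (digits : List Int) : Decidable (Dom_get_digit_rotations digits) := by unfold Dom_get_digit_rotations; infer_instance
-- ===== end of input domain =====

-- B derives each rotation value in O(1) from the previous instead of recomputing it digit by digit (O(n) vs A's O(n^2)); objective: faster.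

-- ===== PORT A =====
-- helper get_number_from_digits: index loop over the deque
def pvNumFromDigits (dq : List Int) : Int :=
  (PySem.List.pyRange 0 (dq.length : Int) 1).foldl
    (fun number digit_num => number * 10 + PySem.List.pyGetD dq digit_num 0) 0

-- deque.rotate(1): last element moves to the front (no-op on empty)
def pvRotate1 (dq : List Int) : List Int :=
  match dq.getLast? with
  | none => []
  | some x => x :: dq.dropLast

def get_digit_rotations (digits : List Int) : List Int :=
  let st := (PySem.List.pyRange 0 (digits.length : Int) 1).foldl
    (fun (st : List Int × List Int) _ => (st.1 ++ [pvNumFromDigits st.2], pvRotate1 st.2))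
    ([], digits)
  PySem.Set.ofList st.1

-- ===== PORT B =====
def get_digit_rotations_alt (digits : List Int) : List Int :=
  let n := digits.length
  if n = 0 then PySem.Set.empty
  else
    let num := digits.foldl (fun num d => num * 10 + d) 0
    let p : Int := 10 ^ (n - 1)
    let st := (PySem.List.pyRange 0 ((n : Int) - 1) 1).foldl
      (fun (st : PySem.Set Int × Int) k =>
        let last := PySem.List.pyGetD digits ((n : Int) - 1 - k) 0
        let num' := last * p + PySem.Int.floordiv (st.2 - last) 10
        (PySem.Set.add st.1 num', num'))
      (PySem.Set.add PySem.Set.empty num, num)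
    st.1

-- ===== PRECONDITION & SPEC =====
def Spec_get_digit_rotations (digits : List Int) (out : List Int) : Prop := out = get_digit_rotations_alt digits
instance (digits : List Int) (out : List Int) : Decidable (Spec_get_digit_rotations digits out) := by unfold Spec_get_digit_rotations; infer_instance

-- ===== CLAIM (what is proved, stated in full; the proofs are below) =====
def Claim_equal_get_digit_rotations : Prop := ∀ (digits : List Int), Dom_get_digit_rotations digits → Spec_get_digit_rotations digits (get_digit_rotations digits)

-- ===== LEMMAS AND PROOFS =====

-- the positional value of a digit list
def pvVal (l : List Int) : Int := l.foldl (fun a d => a * 10 + d) 0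

theorem pvNumFromDigits_eq (dq : List Int) : pvNumFromDigits dq = pvVal dq := by
  unfold pvNumFromDigits pvVal
  exact PySem.List.foldl_pyRange_zero_pyGetD' dq 0 (fun a d => a * 10 + d) 0

-- value with a nonzero accumulator
theorem pvVal_from (t : List Int) : ∀ a : Int,
    t.foldl (fun x d => x * 10 + d) a = a * 10 ^ t.length + pvVal t := by
  induction t with
  | nil => intro a; simp [pvVal]
  | cons x t ih =>
    intro a
    simp only [List.foldl_cons, List.length_cons, pvVal] at *
    rw [ih (a * 10 + x), ih (0 * 10 + x)]
    ring

theorem pvVal_cons (x : Int) (t : List Int) :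
    pvVal (x :: t) = x * 10 ^ t.length + pvVal t := by
  unfold pvVal
  simp only [List.foldl_cons, Int.zero_mul, Int.zero_add]
  exact pvVal_from t x

theorem pvVal_append_singleton (t : List Int) (x : Int) :
    pvVal (t ++ [x]) = pvVal t * 10 + x := by
  unfold pvVal; rw [List.foldl_append]; rfl

-- one rotation step on the value: new last digit in front, exact division by 10
theorem pvVal_rotate1 (l : List Int) (hl : l ≠ []) :
    pvVal (pvRotate1 l) =
      l.getLast hl * 10 ^ (l.length - 1) + PySem.Int.floordiv (pvVal l - l.getLast hl) 10 := by
  have h1 : pvRotate1 l = l.getLast hl :: l.dropLast := by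
    unfold pvRotate1
    rw [List.getLast?_eq_some_getLast hl]
  have hsplit : l = l.dropLast ++ [l.getLast hl] := (List.dropLast_append_getLast hl).symm
  have hv : pvVal l = pvVal l.dropLast * 10 + l.getLast hl := by
    conv_lhs => rw [hsplit]
    exact pvVal_append_singleton _ _
  have hdiv : PySem.Int.floordiv (pvVal l - l.getLast hl) 10 = pvVal l.dropLast := by
    rw [hv]
    have h2 : pvVal l.dropLast * 10 + l.getLast hl - l.getLast hl = 10 * pvVal l.dropLast := by ring
    rw [h2, PySem.Int.floordiv_eq_ediv_of_pos (by norm_num)]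
    exact Int.mul_ediv_cancel_left _ (by norm_num)
  have hlen : l.dropLast.length = l.length - 1 := List.length_dropLast
  rw [h1, pvVal_cons, hlen, hdiv]

-- iterating a loop whose body ignores the loop variable
theorem pvFoldl_const {α β : Type} (F : α → α) :
    ∀ (l : List β) (init : α), l.foldl (fun st _ => F st) init = F^[l.length] init := by
  intro l
  induction l with
  | nil => intro init; simp
  | cons x t ih =>
    intro init
    simp only [List.foldl_cons, List.length_cons, Function.iterate_succ_apply]
    exact ih (F init)

-- the k-th rotation, explicitly
def pvRot (digits : List Int) (k : Nat) : List Int :=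
  digits.drop (digits.length - k) ++ digits.take (digits.length - k)

theorem pvRot_zero (digits : List Int) : pvRot digits 0 = digits := by
  simp [pvRot]

theorem pvRot_length (digits : List Int) (k : Nat) :
    (pvRot digits k).length = digits.length := by
  unfold pvRot
  rw [List.length_append, List.length_drop, List.length_take]
  omega

theorem pvRot_getLast? (digits : List Int) (k : Nat) (hk : k < digits.length) :
    (pvRot digits k).getLast? = some (digits[digits.length - k - 1]'(by omega)) := by
  unfold pvRot
  rw [List.getLast?_append, List.getLast?_take, if_neg (by omega : digits.length - k ≠ 0),
      List.getElem?_eq_getElem (by omega : digits.length - k - 1 < digits.length)]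
  rfl

theorem pvRot_succ (digits : List Int) (k : Nat) (hk : k < digits.length) :
    pvRot digits (k + 1) = pvRotate1 (pvRot digits k) := by
  unfold pvRotate1
  rw [pvRot_getLast? digits k hk]
  simp only
  unfold pvRot
  rw [List.dropLast_append_of_ne_nil (by
    intro h
    have := congrArg List.length h
    rw [List.length_take] at this
    simp at this
    omega)]
  rw [show (List.take (digits.length - k) digits).dropLast = List.take (digits.length - k - 1) digits from by
    rcases Nat.lt_or_ge (digits.length - k) digits.length with h | h
    · exact List.dropLast_take h
    · have hm : digits.length - k = digits.length := by omega
      rw [hm, List.take_length, List.dropLast_eq_take]]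
  rw [show digits.length - (k + 1) = digits.length - k - 1 from by omega]
  rw [List.drop_eq_getElem_cons (by omega : digits.length - k - 1 < digits.length)]
  rw [show digits.length - k - 1 + 1 = digits.length - k from by omega]
  simp

-- A's loop state after m iterations
theorem pvA_loop :
    ∀ (m : Nat) (acc : List Int) (dq : List Int),
      (fun (st : List Int × List Int) => (st.1 ++ [pvNumFromDigits st.2], pvRotate1 st.2))^[m] (acc, dq) =
        (acc ++ (List.range m).map (fun k => pvVal (pvRotate1^[k] dq)), pvRotate1^[m] dq) := by
  intro m
  induction m with
  | zero => intro acc dq; simp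
  | succ m ih =>
    intro acc dq
    rw [Function.iterate_succ_apply]
    simp only
    rw [ih]
    rw [Function.iterate_succ_apply]
    rw [List.range_succ_eq_map]
    simp [pvNumFromDigits_eq, List.map_map, Function.comp_def, List.append_assoc,
      Function.iterate_succ_apply]

theorem pvIter_rot (digits : List Int) :
    ∀ (k : Nat), k ≤ digits.length → pvRotate1^[k] digits = pvRot digits k := by
  intro k
  induction k with
  | zero => intro _; simp [pvRot_zero]
  | succ k ih =>
    intro hk
    rw [Function.iterate_succ_apply', ih (by omega), ← pvRot_succ digits k (by omega)]

-- B's loop state after the first m iterations of range(n-1)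
theorem pvB_loop (digits : List Int) (hne : digits ≠ []) :
    ∀ (m : Nat), m ≤ digits.length - 1 →
      (PySem.List.pyRange 0 (m : Int) 1).foldl
        (fun (st : PySem.Set Int × Int) k =>
          (PySem.Set.add st.1
             (PySem.List.pyGetD digits ((digits.length : Int) - 1 - k) 0 * 10 ^ (digits.length - 1) +
               PySem.Int.floordiv (st.2 - PySem.List.pyGetD digits ((digits.length : Int) - 1 - k) 0) 10),
           PySem.List.pyGetD digits ((digits.length : Int) - 1 - k) 0 * 10 ^ (digits.length - 1) +
             PySem.Int.floordiv (st.2 - PySem.List.pyGetD digits ((digits.length : Int) - 1 - k) 0) 10))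
        (PySem.Set.add PySem.Set.empty (pvVal digits), pvVal digits) =
        (PySem.Set.ofList ((List.range (m + 1)).map (fun k => pvVal (pvRot digits k))),
         pvVal (pvRot digits m)) := by
  intro m
  induction m with
  | zero =>
    intro _
    rw [PySem.List.pyRange_one_eq_nil (by omega)]
    simp [pvRot_zero, PySem.Set.ofList]
  | succ m ih =>
    intro hm
    have hklt : m < digits.length := by
      have : digits.length ≠ 0 := fun h => hne (List.eq_nil_of_length_eq_zero h)
      omega
    rw [show ((m + 1 : Nat) : Int) = ((m : Nat) : Int) + 1 from by omega]
    rw [PySem.List.pyRange_one_succ_right (by omega)]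
    rw [List.foldl_append, ih (by omega)]
    simp only [List.foldl_cons, List.foldl_nil]
    have hrotne : pvRot digits m ≠ [] := by
      intro h
      have := pvRot_length digits m
      rw [h] at this
      simp at this
      omega
    have hL : (pvRot digits m).getLast hrotne = digits[digits.length - m - 1]'(by omega) := by
      have h4 := pvRot_getLast? digits m hklt
      rw [List.getLast?_eq_some_getLast hrotne] at h4
      exact Option.some.inj h4
    have hget : PySem.List.pyGetD digits ((digits.length : Int) - 1 - (m : Int)) 0 =
        digits[digits.length - m - 1]'(by omega) := by
      rw [show ((digits.length : Int) - 1 - (m : Int)) = ((digits.length - m - 1 : Nat) : Int) from by omega]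
      rw [PySem.List.pyGetD_natCast]
      rw [List.getD_eq_getElem _ _ (by omega)]
    have hval : pvVal (pvRot digits (m + 1)) =
        digits[digits.length - m - 1]'(by omega) * 10 ^ (digits.length - 1) +
          PySem.Int.floordiv (pvVal (pvRot digits m) - digits[digits.length - m - 1]'(by omega)) 10 := by
      rw [pvRot_succ digits m hklt, pvVal_rotate1 (pvRot digits m) hrotne, hL, pvRot_length]
    simp only [hget, ← hval]
    have hofl : ∀ (l : List Int) (x : Int),
        PySem.Set.ofList (l ++ [x]) = PySem.Set.add (PySem.Set.ofList l) x := by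
      intro l x
      rw [PySem.Set.ofList_eq_foldl, PySem.Set.ofList_eq_foldl, List.foldl_append]
      rfl
    conv_rhs => rw [List.range_succ, List.map_append]; simp only [List.map_cons, List.map_nil]; rw [hofl]

-- ===== VERDICT (by name: the statement is the Claim_ definition above) =====
theorem get_digit_rotations_spec : Claim_equal_get_digit_rotations := by
  intro digits _
  unfold Spec_get_digit_rotations get_digit_rotations get_digit_rotations_alt
  by_cases hnil : digits = []
  · subst hnil; rfl
  · have hlen : digits.length ≠ 0 := fun h => hnil (List.eq_nil_of_length_eq_zero h)
    simp only [if_neg hlen]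
    -- A's side: the loop body ignores its variable, so it is an iterate
    have hA := pvFoldl_const
      (fun (st : List Int × List Int) => (st.1 ++ [pvNumFromDigits st.2], pvRotate1 st.2))
      (PySem.List.pyRange 0 (digits.length : Int) 1) ([], digits)
    rw [hA, PySem.List.length_pyRange_one]
    rw [show ((digits.length : Int) - 0).toNat = digits.length from by omega]
    rw [pvA_loop digits.length [] digits]
    -- B's side
    have hB := pvB_loop digits hnil (digits.length - 1) (le_refl _)
    rw [show ((digits.length - 1 : Nat) : Int) = (digits.length : Int) - 1 from by omega] at hB
    have hv : pvVal digits = digits.foldl (fun num d => num * 10 + d) 0 := rfl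
    rw [hv] at hB
    rw [hB]
    simp only [List.nil_append]
    rw [show digits.length - 1 + 1 = digits.length from by omega]
    have hmap : (List.range digits.length).map (fun k => pvVal (pvRotate1^[k] digits)) =
        (List.range digits.length).map (fun k => pvVal (pvRot digits k)) := by
      apply List.map_congr_left
      intro k hk
      rw [List.mem_range] at hk
      rw [pvIter_rot digits k (by omega)]
    rw [hmap]
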